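-- pv_equiv track=rewrite | github.com/Owen175/calculator | calculator.py | __remove_following_positives
-- ===== SOURCE A (Python) =====
-- def __remove_following_positives(data: str) -> str:
--     last_d = None
--     returnable = ''
--     for d in data:
--         if not (d == '+' and (last_d == '*' or last_d == '/')):
--             returnable += d
--         last_d = d
--     return returnable
-- ===== SOURCE B (Python) =====
-- def __remove_following_positives(data: str) -> str:
--     out = []
--     i = 0
--     n = len(data)
--     while i < n:
--         c = data[i]
--         out.append(c)
--         if c in '*/' and i + 1 < n and data[i + 1] == '+':
--             i += 2
--         else:
--             i += 1
--     return ''.join(out)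
-- ===== Notes on version B (the rewrite author's own statement) =====
-- stated objective: alternative
-- what changed: Replaces the last_d state machine that filters each character against the previous one by an index loop with one-character lookahead that emits the operator and skips the following '+', consuming two characters at a time and joining a list at the end.
import Mathlib
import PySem

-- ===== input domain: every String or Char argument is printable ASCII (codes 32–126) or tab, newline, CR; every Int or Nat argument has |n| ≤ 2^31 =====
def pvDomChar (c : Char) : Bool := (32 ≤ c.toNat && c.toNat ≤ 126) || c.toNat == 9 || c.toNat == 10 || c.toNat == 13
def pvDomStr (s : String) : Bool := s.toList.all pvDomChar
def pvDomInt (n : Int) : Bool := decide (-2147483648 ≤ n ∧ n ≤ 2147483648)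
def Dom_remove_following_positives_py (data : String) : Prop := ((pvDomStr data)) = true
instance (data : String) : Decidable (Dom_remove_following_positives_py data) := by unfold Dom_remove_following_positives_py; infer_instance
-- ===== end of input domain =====

-- B replaces A's last_d state machine by a lookahead scan that skips '+' after '*' or '/' (alternative decomposition, same cost).

-- ===== PORT A =====
-- A's loop: for d in data, keep d unless d == '+' and last_d in {'*','/'}; ret accumulates the kept chars.
def pvALoop : List Char → Option Char → List Char → List Char
  | [], _, ret => ret
  | d :: rest, last, ret =>
      pvALoop rest (some d)
        (if !(d == '+' && (last == some '*' || last == some '/')) then ret ++ [d] else ret)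

def remove_following_positives_py (data : String) : String :=
  String.ofList (pvALoop data.toList none [])

-- ===== PORT B =====
-- B's loop: emit the current char; if it is '*' or '/' and the next char is '+', skip that '+'.
def pvBGo : List Char → List Char
  | [] => []
  | [c] => [c]
  | c :: d :: rest =>
      if (c == '*' || c == '/') && d == '+' then c :: pvBGo rest
      else c :: pvBGo (d :: rest)

def remove_following_positives_py_alt (data : String) : String :=
  String.ofList (pvBGo data.toList)

-- ===== PRECONDITION & SPEC =====
def Spec_remove_following_positives_py (data : String) (out : String) : Prop := out = remove_following_positives_py_alt data
instance (data : String) (out : String) : Decidable (Spec_remove_following_positives_py data out) := by unfold Spec_remove_following_positives_py; infer_instance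

-- ===== CLAIM (what is proved, stated in full; the proofs are below) =====
def Claim_equal_remove_following_positives_py : Prop := ∀ (data : String), Dom_remove_following_positives_py data → Spec_remove_following_positives_py data (remove_following_positives_py data)

-- ===== LEMMAS AND PROOFS =====

theorem pvALoop_acc (l : List Char) (last : Option Char) (ret : List Char) :
    pvALoop l last ret = ret ++ pvALoop l last [] := by
  induction l generalizing last ret with
  | nil => simp [pvALoop]
  | cons d rest ih =>
      by_cases h : (d == '+' && (last == some '*' || last == some '/')) = true
      · simp only [pvALoop, h, Bool.not_true, Bool.false_eq_true, if_false]
        exact ih _ _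
      · simp only [pvALoop, if_pos (by simp [h] : (!(d == '+' && (last == some '*' || last == some '/'))) = true)]
        rw [ih (some d) (ret ++ [d]), ih (some d) ([] ++ [d])]
        simp

theorem pvALoop_eq (l : List Char) (last : Option Char) :
    pvALoop l last [] =
      if ((last == some '*' || last == some '/') && (l.head? == some '+')) = true then
        pvBGo l.tail
      else pvBGo l := by
  induction l generalizing last with
  | nil => simp [pvALoop, pvBGo]
  | cons d rest ih =>
      by_cases hc : (d == '+' && (last == some '*' || last == some '/')) = true
      · have hd : d = '+' := by
          have := (Bool.and_eq_true _ _).mp hc |>.1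
          exact eq_of_beq this
        have hop : (last == some '*' || last == some '/') = true :=
          ((Bool.and_eq_true _ _).mp hc).2
        subst hd
        simp only [pvALoop, hc, Bool.not_true, Bool.false_eq_true, if_false]
        rw [ih]
        simp [hop]
      · simp only [pvALoop, if_pos (by simp only [hc, Bool.not_false] : (!(d == '+' && (last == some '*' || last == some '/'))) = true)]
        rw [pvALoop_acc, ih]
        have hrhs : ((last == some '*' || last == some '/') && ((d :: rest).head? == some '+')) = false := by
          cases hdp : (d == '+') with
          | true =>
              have : (last == some '*' || last == some '/') = false := by
                cases h2 : (last == some '*' || last == some '/') with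
                | true => exact absurd (by rw [hdp, h2]; rfl) hc
                | false => rfl
              simp [this]
          | false => simp [List.head?, hdp]
        rw [hrhs]
        simp only [Bool.false_eq_true, if_false]
        cases rest with
        | nil => simp [pvBGo]
        | cons e r =>
            simp only [List.head?, List.tail]
            by_cases he : ((d == '*' || d == '/') && (e == '+')) = true
            · simp [pvBGo, he]
            · simp [pvBGo, he]

-- ===== VERDICT (by name: the statement is the Claim_ definition above) =====
theorem remove_following_positives_py_spec : Claim_equal_remove_following_positives_py := by
  intro data _
  unfold Spec_remove_following_positives_py remove_following_positives_py remove_following_positives_py_alt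
  rw [pvALoop_eq]
  simp [List.head?]
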